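-- pv_equiv track=rewrite | github.com/Nagavenkatasai7/assistant | src/scoring/ats_scorer.py | _prioritize_suggestions
-- ===== SOURCE A (Python) =====
-- from typing import Dict, List, Optional
--
-- def _prioritize_suggestions(suggestions: List[str], category_scores: Dict) -> List[str]:
--     """
--     Prioritize suggestions based on impact.
--
--     Priority order:
--     1. Critical failures (missing required sections, very low scores)
--     2. High-impact improvements (keyword matching, format issues)
--     3. Medium-impact improvements (density, metrics)
--     4. Low-impact improvements (minor formatting)
--     """
--     # Remove duplicates while preserving order
--     seen = set()
--     unique_suggestions = []
--     for sugg in suggestions: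
--         if sugg not in seen:
--             seen.add(sugg)
--             unique_suggestions.append(sugg)
--
--     # Simple prioritization: critical keywords first
--     priority_keywords = [
--         'missing keywords',
--         'missing sections',
--         'missing contact',
--         'remove tables',
--         'remove images',
--         'file format',
--         'critically low',
--         'density too',
--     ]
--
--     prioritized = []
--     remaining = []
--
--     for sugg in unique_suggestions:
--         is_priority = any(keyword in sugg.lower() for keyword in priority_keywords)
--         if is_priority:
--             prioritized.append(sugg)
--         else:
--             remaining.append(sugg)
--
--     return prioritized + remaining
-- ===== SOURCE B (Python) =====
-- from typing import Dict, List, Optional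
--
-- def _prioritize_suggestions(suggestions: List[str], category_scores: Dict) -> List[str]:
--     priority_keywords = [
--         'missing keywords',
--         'missing sections',
--         'missing contact',
--         'remove tables',
--         'remove images',
--         'file format',
--         'critically low',
--         'density too',
--     ]
--     unique = list(dict.fromkeys(suggestions))
--     # Stable sort on a boolean key: priority items (key False) come first,
--     # original relative order is preserved within each group.
--     return sorted(unique, key=lambda s: not any(kw in s.lower() for kw in priority_keywords))
-- ===== Notes on version B (the rewrite author's own statement) =====
-- stated objective: idiomatic
-- what changed: Dedup via dict.fromkeys and a single stable sort on a boolean priority key replace the hand-written seen-set loop and the two-accumulator partition-and-concatenate loop.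
import Mathlib
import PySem

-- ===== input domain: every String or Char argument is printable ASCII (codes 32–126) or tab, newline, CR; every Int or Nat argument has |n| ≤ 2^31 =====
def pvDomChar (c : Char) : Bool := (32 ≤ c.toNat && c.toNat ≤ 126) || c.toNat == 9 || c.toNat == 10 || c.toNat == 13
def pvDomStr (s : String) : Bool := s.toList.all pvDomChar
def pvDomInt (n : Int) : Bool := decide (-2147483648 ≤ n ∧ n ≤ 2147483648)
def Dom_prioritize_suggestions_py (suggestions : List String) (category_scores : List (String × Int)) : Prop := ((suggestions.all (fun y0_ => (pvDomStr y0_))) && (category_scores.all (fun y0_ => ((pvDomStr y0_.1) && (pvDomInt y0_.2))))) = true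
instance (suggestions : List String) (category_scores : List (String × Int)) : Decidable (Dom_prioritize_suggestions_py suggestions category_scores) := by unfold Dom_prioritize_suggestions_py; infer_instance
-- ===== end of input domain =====

-- B dedups with dict.fromkeys and orders by ONE stable sort on a boolean priority key,
-- replacing A's hand-written seen-set loop and two-accumulator partition; objective: idiomatic.


-- ===== PORT A =====
-- the priority_keywords literal (shared verbatim by both ports)
def pvKeywords : List String :=
  ["missing keywords", "missing sections", "missing contact", "remove tables",
   "remove images", "file format", "critically low", "density too"]

def prioritize_suggestions_py (suggestions : List String) (category_scores : List (String × Int)) : List String :=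
  -- seen-set + list dedup loop
  let dedupSt := suggestions.foldl
    (fun (p : PySem.Set String × List String) sugg =>
      if !(p.1.contains sugg) then (p.1.add sugg, p.2 ++ [sugg]) else p)
    (PySem.Set.empty, [])
  let unique_suggestions := dedupSt.2
  -- prioritized/remaining partition loop
  let part := unique_suggestions.foldl
    (fun (p : List String × List String) sugg =>
      let is_priority := pvKeywords.any (fun kw => PySem.Str.isIn kw (PySem.Str.lower sugg))
      if is_priority then (p.1 ++ [sugg], p.2) else (p.1, p.2 ++ [sugg]))
    ([], [])
  part.1 ++ part.2

-- ===== PORT B =====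
def prioritize_suggestions_py_alt (suggestions : List String) (category_scores : List (String × Int)) : List String :=
  let unique := PySem.List.dedup suggestions
  PySem.List.sorted unique
    (fun s => !(pvKeywords.any (fun kw => PySem.Str.isIn kw (PySem.Str.lower s))))

-- ===== PRECONDITION & SPEC =====
def Spec_prioritize_suggestions_py (suggestions : List String) (category_scores : List (String × Int)) (out : List String) : Prop := out = prioritize_suggestions_py_alt suggestions category_scores
instance (suggestions : List String) (category_scores : List (String × Int)) (out : List String) : Decidable (Spec_prioritize_suggestions_py suggestions category_scores out) := by unfold Spec_prioritize_suggestions_py; infer_instance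

-- ===== CLAIM (what is proved, stated in full; the proofs are below) =====
def Claim_equal_prioritize_suggestions_py : Prop := ∀ (suggestions : List String) (category_scores : List (String × Int)), Dom_prioritize_suggestions_py suggestions category_scores → Spec_prioritize_suggestions_py suggestions category_scores (prioritize_suggestions_py suggestions category_scores)

-- ===== LEMMAS AND PROOFS =====

-- A's seen-set/list loop, started from a duplicated state, keeps both components equal to the Set fold.
theorem dedup_loop_eq {α : Type} [BEq α] (xs : List α) : ∀ (s : PySem.Set α),
    xs.foldl (fun (p : PySem.Set α × List α) x =>
        if !(p.1.contains x) then (p.1.add x, p.2 ++ [x]) else p) (s, s)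
      = (xs.foldl PySem.Set.add s, xs.foldl PySem.Set.add s) := by
  induction xs with
  | nil => intro s; rfl
  | cons x xs ih =>
    intro s
    simp only [List.foldl_cons]
    have hstep : (if (!s.contains x) = true then (PySem.Set.add s x, s ++ [x]) else (s, s))
        = (PySem.Set.add s x, PySem.Set.add s x) := by
      by_cases h : List.contains s x = true <;>
        simp [PySem.Set.add, PySem.Set.contains, h]
    rw [hstep, ih]

-- A's partition loop appends the two keyword filters to its accumulators.
theorem partition_loop_eq (xs : List String) : ∀ (P R : List String),
    xs.foldl (fun (p : List String × List String) sugg =>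
        if (pvKeywords.any (fun kw => PySem.Str.isIn kw (PySem.Str.lower sugg))) = true
        then (p.1 ++ [sugg], p.2) else (p.1, p.2 ++ [sugg])) (P, R)
      = (P ++ xs.filter (fun s => pvKeywords.any (fun kw => PySem.Str.isIn kw (PySem.Str.lower s))),
         R ++ xs.filter (fun s => !(pvKeywords.any (fun kw => PySem.Str.isIn kw (PySem.Str.lower s))))) := by
  induction xs with
  | nil => intro P R; simp
  | cons x xs ih =>
    intro P R
    simp only [List.foldl_cons]
    by_cases h : (pvKeywords.any (fun kw => PySem.Str.isIn kw (PySem.Str.lower x))) = true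
    · rw [if_pos h, ih (P ++ [x]) R]
      simp only [List.filter_cons, h, Bool.not_true, if_true, if_false,
        Bool.false_eq_true, List.append_assoc, List.cons_append, List.nil_append]
    · simp only [Bool.not_eq_true] at h
      rw [if_neg (by rw [h]; exact Bool.false_ne_true), ih P (R ++ [x])]
      simp only [List.filter_cons, h, Bool.not_false, if_true, if_false,
        Bool.false_eq_true, List.append_assoc, List.cons_append, List.nil_append]

-- Inserting into a false-block ++ true-block keeps the two blocks separated.
theorem insertBy_bool_partition {α : Type} (key : α → Bool) (x : α) :
    ∀ (A B : List α), (∀ a ∈ A, key a = false) → (∀ b ∈ B, key b = true) →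
    PySem.List.insertBy (fun a b => decide (key a < key b)) x (A ++ B)
      = if key x then (A ++ B) ++ [x] else A ++ x :: B := by
  intro A B hA hB
  by_cases hx : key x = true
  · rw [PySem.List.insertBy_of_forall_not_before]
    · simp [hx]
    · intro y hy
      rcases List.mem_append.mp hy with h | h
      · simp [hx, hA y h]
      · simp [hx, hB y h]
  · simp only [Bool.not_eq_true] at hx
    simp only [hx, if_neg Bool.false_ne_true]
    induction A with
    | nil =>
      cases B with
      | nil => rfl
      | cons b B' =>
        have hb : key b = true := hB b (List.mem_cons_self ..)
        simp [PySem.List.insertBy, hx, hb]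
    | cons a A' ihA =>
      have ha : key a = false := hA a (List.mem_cons_self ..)
      have : PySem.List.insertBy (fun a b => decide (key a < key b)) x ((a :: A') ++ B)
          = a :: PySem.List.insertBy (fun a b => decide (key a < key b)) x (A' ++ B) := by
        simp [PySem.List.insertBy, hx, ha]
      rw [this, ihA (fun a ha' => hA a (List.mem_cons_of_mem _ ha'))]
      rfl

-- The whole insertion-sort fold with a boolean key is the two-filter partition.
theorem foldl_insertBy_bool {α : Type} (key : α → Bool) :
    ∀ (xs A B : List α), (∀ a ∈ A, key a = false) → (∀ b ∈ B, key b = true) →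
    xs.foldl (fun acc x => PySem.List.insertBy (fun a b => decide (key a < key b)) x acc) (A ++ B)
      = (A ++ xs.filter (fun x => !key x)) ++ (B ++ xs.filter key) := by
  intro xs
  induction xs with
  | nil => intro A B _ _; simp
  | cons x xs ih =>
    intro A B hA hB
    simp only [List.foldl_cons]
    rw [insertBy_bool_partition key x A B hA hB]
    by_cases hx : key x = true
    · rw [if_pos hx, List.append_assoc A B [x],
          ih A (B ++ [x]) hA (by intro b hb; rcases List.mem_append.mp hb with h | h
                                 · exact hB b h
                                 · simp at h; simpa [h] using hx)]
      simp [hx]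
    · simp only [Bool.not_eq_true] at hx
      rw [if_neg (by simp [hx]),
          show A ++ x :: B = (A ++ [x]) ++ B by simp,
          ih (A ++ [x]) B (by intro a ha; rcases List.mem_append.mp ha with h | h
                              · exact hA a h
                              · simp at h; simpa [h] using hx) hB]
      simp [hx]

theorem sorted_bool_key {α : Type} (key : α → Bool) (xs : List α) :
    PySem.List.sorted xs key = xs.filter (fun x => !key x) ++ xs.filter key := by
  have := foldl_insertBy_bool key xs [] [] (by simp) (by simp)
  simpa [PySem.List.sorted] using this

-- ===== VERDICT (by name: the statement is the Claim_ definition above) =====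
theorem prioritize_suggestions_py_spec : Claim_equal_prioritize_suggestions_py := by
  intro suggestions category_scores _
  unfold Spec_prioritize_suggestions_py prioritize_suggestions_py prioritize_suggestions_py_alt
  simp only [PySem.Set.empty, dedup_loop_eq]
  rw [partition_loop_eq, sorted_bool_key]
  simp only [PySem.List.dedup, PySem.Set.ofList, PySem.Set.empty]
  simp [Bool.not_not]
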